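-- pv_equiv track=rewrite | github.com/Andrey529/CollisionDetector | output_matrix_calculation.py | format_output_data
-- ===== SOURCE A (Python) =====
-- def format_output_data(numbers):
-- 	left_inf, right_inf, left_lidar, right_lidar = numbers
-- 	left_inf = int(left_inf)
-- 	right_inf = int(right_inf)
-- 	left_lidar = int(left_lidar)
-- 	right_lidar  = int(right_lidar)
-- 	first_sector = inf_calculation(left_inf)
-- 	second_sector = lidar_calculation(left_lidar)
-- 	third_sector = lidar_calculation(right_lidar)
-- 	fourth_sector = inf_calculation(right_inf)
-- 	#0 - white
-- 	#1 - green
-- 	#2 - red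
-- 	output_data = [1] * 8
-- 	for i in range(8):
-- 		output_data[i] = [1] * 8
-- 	rows = [0,1,2]
-- 	columns = [0,1,6,7]
-- 	for i in rows:
-- 		for j in columns:
-- 			output_data[i][j] = 0
--
-- 	for i in range(3,3+first_sector):
-- 		output_data[i][0] = 2
-- 		output_data[i][1] = 2
-- 	for i in range(3,3+fourth_sector):
-- 		output_data[i][6] = 2
-- 		output_data[i][7] = 2
-- 	for i in range(second_sector):
-- 		output_data[i][2] = 2
-- 		output_data[i][3] = 2
-- 	for i in range(third_sector):
-- 		output_data[i][4] = 2
-- 		output_data[i][5] = 2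
-- 	return output_data
--
-- def lidar_calculation(distance):
-- 	if distance == 0:
-- 		return 0
-- 	points_in_lidar_zone = 3
-- 	# calculate by inf radar zone if less then 450sm
-- 	if distance < 450:
-- 		return points_in_lidar_zone + inf_calculation(distance)
--
-- 	#TODO check can lidar give more then 1200sm
--
-- 	# calculate by lidar zone if more then 450sm
-- 	max_distance_in_inf_zone = 450
-- 	proportion_by_one_point = 250
-- 	distance_in_lidar_zone = distance - max_distance_in_inf_zone
-- 	return points_in_lidar_zone - distance_in_lidar_zone // proportion_by_one_point
--
-- def inf_calculation(distance):
-- 	if distance == 0: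
-- 		return 0
-- 	points_in_sector = 5
-- 	proportion_by_one_point = 90
-- 	max_distance_in_inf_zone = 450
-- 	# too high distance
-- 	if distance > max_distance_in_inf_zone:
-- 		return 0
-- 	# calculate how many points will be drown
-- 	return points_in_sector - distance // proportion_by_one_point
-- ===== SOURCE B (Python) =====
-- def format_output_data(numbers):
-- 	left_inf, right_inf, left_lidar, right_lidar = numbers
-- 	first_sector = inf_calculation(int(left_inf))
-- 	second_sector = lidar_calculation(int(left_lidar))
-- 	third_sector = lidar_calculation(int(right_lidar))
-- 	fourth_sector = inf_calculation(int(right_inf))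
-- 	#0 - white, 1 - green, 2 - red: decide each cell directly
-- 	def cell(i, j):
-- 		if j < 2:
-- 			return 0 if i < 3 else (2 if i < 3 + first_sector else 1)
-- 		if j >= 6:
-- 			return 0 if i < 3 else (2 if i < 3 + fourth_sector else 1)
-- 		if j < 4:
-- 			return 2 if i < second_sector else 1
-- 		return 2 if i < third_sector else 1
-- 	return [[cell(i, j) for j in range(8)] for i in range(8)]
--
-- def lidar_calculation(distance):
-- 	if distance == 0:
-- 		return 0
-- 	points_in_lidar_zone = 3
-- 	if distance < 450:
-- 		return points_in_lidar_zone + inf_calculation(distance)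
-- 	max_distance_in_inf_zone = 450
-- 	proportion_by_one_point = 250
-- 	distance_in_lidar_zone = distance - max_distance_in_inf_zone
-- 	return points_in_lidar_zone - distance_in_lidar_zone // proportion_by_one_point
--
-- def inf_calculation(distance):
-- 	if distance == 0:
-- 		return 0
-- 	points_in_sector = 5
-- 	proportion_by_one_point = 90
-- 	max_distance_in_inf_zone = 450
-- 	if distance > max_distance_in_inf_zone:
-- 		return 0
-- 	return points_in_sector - distance // proportion_by_one_point
-- ===== Notes on version B (the rewrite author's own statement) =====
-- stated objective: simpler
-- what changed: B replaces A's mutable 8x8 grid with its init pass plus four overwrite loops by a single nested comprehension that decides each cell's colour directly from its (row, column) position and the sector sizes.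
import Mathlib
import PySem

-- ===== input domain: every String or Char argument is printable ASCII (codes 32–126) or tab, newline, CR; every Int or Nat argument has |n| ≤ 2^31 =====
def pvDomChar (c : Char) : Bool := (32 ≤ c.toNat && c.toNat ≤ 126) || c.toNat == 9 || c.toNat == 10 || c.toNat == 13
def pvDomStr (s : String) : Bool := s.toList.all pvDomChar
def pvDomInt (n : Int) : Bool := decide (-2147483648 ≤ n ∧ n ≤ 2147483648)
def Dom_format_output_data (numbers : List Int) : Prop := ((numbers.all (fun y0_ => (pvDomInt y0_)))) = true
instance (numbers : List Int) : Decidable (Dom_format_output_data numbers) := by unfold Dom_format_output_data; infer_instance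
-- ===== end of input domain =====

-- B replaces A's grid-init plus four overwrite passes by one per-cell decision; same values, no speed claim.
-- ===== PORT A =====
-- helper inf_calculation, transliterated
def pvInf (distance : Int) : Int :=
  if distance = 0 then 0
  else if distance > 450 then 0
  else 5 - PySem.Int.floordiv distance 90

-- helper lidar_calculation, transliterated
def pvLidar (distance : Int) : Int :=
  if distance = 0 then 0
  else if distance < 450 then 3 + pvInf distance
  else 3 - PySem.Int.floordiv (distance - 450) 250

-- output_data[i][j] = v; exact for in-range nonneg indices (the only ones reached under Pre_);
-- Python raises IndexError out of range, which Pre_ excludes.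
def pvSet (g : List (List Int)) (i j : Int) (v : Int) : List (List Int) :=
  g.set i.toNat ((g.getD i.toNat []).set j.toNat v)

-- A's body after the sector computations: the init pass and the four overwrite loops.
-- (Python's '[1]*8' placeholder list is immediately overwritten row by row with '[1]*8';
-- ported as building the grid of rows over the same range(8).)
def pvGridA (s1 s2 s3 s4 : Int) : List (List Int) :=
  let g0 := (PySem.List.pyRange 0 8 1).map (fun _ => List.replicate 8 (1 : Int))
  let g1 := [(0 : Int), 1, 2].foldl
      (fun g i => [(0 : Int), 1, 6, 7].foldl (fun g j => pvSet g i j 0) g) g0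
  let g2 := (PySem.List.pyRange 3 (3 + s1) 1).foldl (fun g i => pvSet (pvSet g i 0 2) i 1 2) g1
  let g3 := (PySem.List.pyRange 3 (3 + s4) 1).foldl (fun g i => pvSet (pvSet g i 6 2) i 7 2) g2
  let g4 := (PySem.List.pyRange 0 s2 1).foldl (fun g i => pvSet (pvSet g i 2 2) i 3 2) g3
  let g5 := (PySem.List.pyRange 0 s3 1).foldl (fun g i => pvSet (pvSet g i 4 2) i 5 2) g4
  g5

def format_output_data (numbers : List Int) : List (List Int) :=
  match numbers with
  | [a, b, c, d] => pvGridA (pvInf a) (pvLidar c) (pvLidar d) (pvInf b)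
  | _ => []  -- Python: unpacking raises ValueError here; excluded by Pre_

-- ===== PORT B =====
-- B reuses the module helpers unchanged; duplicated here so each port is self-contained.
def pvInfB (distance : Int) : Int :=
  if distance = 0 then 0
  else if distance > 450 then 0
  else 5 - PySem.Int.floordiv distance 90

def pvLidarB (distance : Int) : Int :=
  if distance = 0 then 0
  else if distance < 450 then 3 + pvInfB distance
  else 3 - PySem.Int.floordiv (distance - 450) 250

-- B's per-cell colour decision
def pvCell (s1 s2 s3 s4 : Int) (i j : Int) : Int :=
  if j < 2 then (if i < 3 then 0 else if i < 3 + s1 then 2 else 1)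
  else if 6 ≤ j then (if i < 3 then 0 else if i < 3 + s4 then 2 else 1)
  else if j < 4 then (if i < s2 then 2 else 1)
  else (if i < s3 then 2 else 1)

def pvGridB (s1 s2 s3 s4 : Int) : List (List Int) :=
  (PySem.List.pyRange 0 8 1).map (fun i =>
    (PySem.List.pyRange 0 8 1).map (fun j => pvCell s1 s2 s3 s4 i j))

-- tuple unpacking ported as a length test plus positional reads (exact for length 4;
-- Python raises ValueError on any other length, excluded by Pre_)
def format_output_data_alt (numbers : List Int) : List (List Int) :=
  if numbers.length = 4 then
    pvGridB (pvInfB (numbers.getD 0 0)) (pvLidarB (numbers.getD 2 0))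
      (pvLidarB (numbers.getD 3 0)) (pvInfB (numbers.getD 1 0))
  else []

-- ===== PRECONDITION & SPEC =====
-- Pre_ admits exactly the inputs on which A returns: four distances, each nonnegative
-- (a negative distance makes a sector size overflow the 8-row grid and A raises IndexError;
-- any other length makes the tuple unpacking raise ValueError).
def Pre_format_output_data (numbers : List Int) : Prop :=
  numbers.length = 4 ∧ ∀ x ∈ numbers, 0 ≤ x
instance (numbers : List Int) : Decidable (Pre_format_output_data numbers) := by
  unfold Pre_format_output_data; infer_instance

def pvWitness_format_output_data : List Int := [90, 200, 500, 0]


def Spec_format_output_data (numbers : List Int) (out : List (List Int)) : Prop :=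
  out = format_output_data_alt numbers
instance (numbers : List Int) (out : List (List Int)) : Decidable (Spec_format_output_data numbers out) := by
  unfold Spec_format_output_data; infer_instance

-- ===== CLAIM (what is proved, stated in full; the proofs are below) =====
def Claim_equal_format_output_data : Prop :=
  ∀ (numbers : List Int), Dom_format_output_data numbers →
    Pre_format_output_data numbers →
    Spec_format_output_data numbers (format_output_data numbers)

-- ===== LEMMAS AND PROOFS =====

lemma pvInfB_eq : pvInfB = pvInf := rfl
lemma pvLidarB_eq : pvLidarB = pvLidar := rfl

lemma pvInf_bounds (d : Int) (hd : 0 ≤ d) : 0 ≤ pvInf d ∧ pvInf d ≤ 5 := by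
  unfold pvInf
  split_ifs with h0 h450
  · omega
  · omega
  · have hpos : (0 : Int) < 90 := by omega
    rw [PySem.Int.floordiv_eq_ediv_of_pos hpos]
    have h1 : 0 ≤ d / 90 := Int.ediv_nonneg hd (by omega)
    have h2 : d / 90 ≤ 450 / 90 := Int.ediv_le_ediv (by omega) (by omega)
    omega

lemma pvLidar_le (d : Int) (hd : 0 ≤ d) : pvLidar d ≤ 8 := by
  unfold pvLidar
  split_ifs with h0 h450
  · omega
  · have := pvInf_bounds d hd
    omega
  · have hpos : (0 : Int) < 250 := by omega
    rw [PySem.Int.floordiv_eq_ediv_of_pos hpos]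
    have : 0 ≤ (d - 450) / 250 := Int.ediv_nonneg (by omega) (by omega)
    omega

lemma pyRange_nonpos (b : Int) (hb : b ≤ 0) : PySem.List.pyRange 0 b 1 = [] := by
  rw [PySem.List.pyRange_one]
  have h : (b - 0).toNat = 0 := by omega
  rw [h]
  simp

lemma gridA_clamp2 (s1 s2 s3 s4 : Int) :
    pvGridA s1 s2 s3 s4 = pvGridA s1 (max s2 0) s3 s4 := by
  rcases le_total s2 0 with h | h
  · have hm : max s2 0 = 0 := by omega
    simp only [pvGridA, hm, pyRange_nonpos s2 h, pyRange_nonpos 0 (by omega)]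
  · have hm : max s2 0 = s2 := by omega
    rw [hm]

lemma gridA_clamp3 (s1 s2 s3 s4 : Int) :
    pvGridA s1 s2 s3 s4 = pvGridA s1 s2 (max s3 0) s4 := by
  rcases le_total s3 0 with h | h
  · have hm : max s3 0 = 0 := by omega
    simp only [pvGridA, hm, pyRange_nonpos s3 h, pyRange_nonpos 0 (by omega)]
  · have hm : max s3 0 = s3 := by omega
    rw [hm]

lemma gridB_clamp2 (s1 s2 s3 s4 : Int) :
    pvGridB s1 s2 s3 s4 = pvGridB s1 (max s2 0) s3 s4 := by
  rcases le_total s2 0 with h | h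
  · unfold pvGridB
    apply List.map_congr_left
    intro i hi
    have h0 : 0 ≤ i := (PySem.List.mem_pyRange_one.mp hi).1
    have h1 : ¬ i < s2 := by omega
    have h2 : ¬ i < max s2 0 := by omega
    simp [pvCell, h1, h2]
  · have hm : max s2 0 = s2 := by omega
    rw [hm]

lemma gridB_clamp3 (s1 s2 s3 s4 : Int) :
    pvGridB s1 s2 s3 s4 = pvGridB s1 s2 (max s3 0) s4 := by
  rcases le_total s3 0 with h | h
  · unfold pvGridB
    apply List.map_congr_left
    intro i hi
    have h0 : 0 ≤ i := (PySem.List.mem_pyRange_one.mp hi).1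
    have h1 : ¬ i < s3 := by omega
    have h2 : ¬ i < max s3 0 := by omega
    simp [pvCell, h1, h2]
  · have hm : max s3 0 = s3 := by omega
    rw [hm]

set_option maxHeartbeats 40000000 in
lemma grid_eq_bounded :
    ∀ (a : Fin 6) (b : Fin 9) (c : Fin 9) (d : Fin 6),
      pvGridA ((a : Nat) : Int) ((b : Nat) : Int) ((c : Nat) : Int) ((d : Nat) : Int)
        = pvGridB ((a : Nat) : Int) ((b : Nat) : Int) ((c : Nat) : Int) ((d : Nat) : Int) := by
  decide

lemma grid_eq (s1 s2 s3 s4 : Int)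
    (h1 : 0 ≤ s1 ∧ s1 ≤ 5) (h4 : 0 ≤ s4 ∧ s4 ≤ 5) (h2 : s2 ≤ 8) (h3 : s3 ≤ 8) :
    pvGridA s1 s2 s3 s4 = pvGridB s1 s2 s3 s4 := by
  rw [gridA_clamp2, gridA_clamp3, gridB_clamp2, gridB_clamp3]
  have e1 : ((s1.toNat : Nat) : Int) = s1 := Int.toNat_of_nonneg h1.1
  have e4 : ((s4.toNat : Nat) : Int) = s4 := Int.toNat_of_nonneg h4.1
  have e2 : (((max s2 0).toNat : Nat) : Int) = max s2 0 := Int.toNat_of_nonneg (by omega)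
  have e3 : (((max s3 0).toNat : Nat) : Int) = max s3 0 := Int.toNat_of_nonneg (by omega)
  have := grid_eq_bounded ⟨s1.toNat, by omega⟩ ⟨(max s2 0).toNat, by omega⟩
      ⟨(max s3 0).toNat, by omega⟩ ⟨s4.toNat, by omega⟩
  simpa [e1, e2, e3, e4] using this

-- ===== VERDICT (by name: the statement is the Claim_ definition above) =====
theorem format_output_data_spec : Claim_equal_format_output_data := by
  intro numbers _ hpre
  obtain ⟨hlen, hnn⟩ := hpre
  match numbers with
  | [a, b, c, d] =>
    have ha : 0 ≤ a := hnn a (by simp)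
    have hb : 0 ≤ b := hnn b (by simp)
    have hc : 0 ≤ c := hnn c (by simp)
    have hd : 0 ≤ d := hnn d (by simp)
    show format_output_data [a, b, c, d] = format_output_data_alt [a, b, c, d]
    simp only [format_output_data, format_output_data_alt, List.length_cons,
      List.length_nil, List.getD, List.getElem?_cons_zero, List.getElem?_cons_succ,
      Option.getD_some, if_pos, pvInfB_eq, pvLidarB_eq]
    exact grid_eq _ _ _ _ (pvInf_bounds a ha) (pvInf_bounds b hb)
      (pvLidar_le c hc) (pvLidar_le d hd)
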